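-- pv_equiv track=rewrite | github.com/con-cat/advent-of-code | 2024/python/day01.py | part_2
-- ===== SOURCE A (Python) =====
-- def part_2(left_list: list[int], right_list: list[int]) -> int:
--     similarity_score = 0
--     for left_number in left_list:
--         times_seen = 0
--         for right_number in right_list:
--             if right_number == left_number:
--                 times_seen += 1
--
--         similarity_score += left_number * times_seen
--
--     return similarity_score
-- ===== SOURCE B (Python) =====
-- def part_2(left_list: list[int], right_list: list[int]) -> int:
--     L = sorted(left_list)
--     R = sorted(right_list)
--     total = 0
--     i = j = 0
--     while i < len(L) and j < len(R):
--         if L[i] < R[j]: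
--             i += 1
--         elif R[j] < L[i]:
--             j += 1
--         else:
--             v = L[i]
--             c = 0
--             while j + c < len(R) and R[j + c] == v:
--                 c += 1
--             k = 0
--             while i + k < len(L) and L[i + k] == v:
--                 k += 1
--             total += v * c * k
--             i += k
--     return total
-- ===== Notes on version B (the rewrite author's own statement) =====
-- stated objective: faster
-- what changed: Sort both lists and walk them with a two-pointer merge: for each matching value it counts the run lengths k in the left and c in the right once and adds v*c*k, instead of rescanning the whole right list for every left element.
import Mathlib
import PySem

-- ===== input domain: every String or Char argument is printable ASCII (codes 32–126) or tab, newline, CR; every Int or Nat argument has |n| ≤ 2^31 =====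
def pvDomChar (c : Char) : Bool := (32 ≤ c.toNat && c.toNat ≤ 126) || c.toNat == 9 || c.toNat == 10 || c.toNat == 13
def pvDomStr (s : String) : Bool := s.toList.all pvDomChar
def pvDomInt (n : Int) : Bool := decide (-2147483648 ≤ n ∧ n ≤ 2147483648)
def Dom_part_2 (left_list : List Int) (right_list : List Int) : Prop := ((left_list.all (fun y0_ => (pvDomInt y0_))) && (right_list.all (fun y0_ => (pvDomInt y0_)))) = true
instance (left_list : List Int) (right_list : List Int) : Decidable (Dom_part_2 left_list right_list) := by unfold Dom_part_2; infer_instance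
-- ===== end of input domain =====

-- ===== PORT A =====
-- B sorts both lists and does a two-pointer merge instead of A's nested rescan.
def part_2 (left_list : List Int) (right_list : List Int) : Int :=
  left_list.foldl (fun similarity_score left_number =>
    let times_seen := right_list.foldl (fun times_seen right_number =>
      if right_number == left_number then times_seen + 1 else times_seen) (0 : Int)
    similarity_score + left_number * times_seen) 0

-- ===== PORT B =====
-- length of the leading run of elements equal to v (B's inner while loop)
def pvRunLen (v : Int) : List Int → Nat
  | [] => 0
  | x :: xs => if x == v then pvRunLen v xs + 1 else 0

-- B's two-pointer merge over the two sorted lists: count both matching runs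
-- once, add v*c*k, and advance past the whole left run
def pvMerge : List Int → List Int → Int
  | [], _ => 0
  | _ :: _, [] => 0
  | a :: as, b :: bs =>
    if a < b then pvMerge as (b :: bs)
    else if b < a then pvMerge (a :: as) bs
    else
      a * (pvRunLen a (b :: bs) : Int) * (pvRunLen a (a :: as) : Int)
        + pvMerge (List.dropWhile (· == a) (a :: as)) (b :: bs)
termination_by L R => L.length + R.length
decreasing_by
  · simp
  · simp
  · simp only [List.dropWhile, beq_self_eq_true]
    have := List.length_dropWhile_le (· == a) as
    simp
    omega

def part_2_alt (left_list : List Int) (right_list : List Int) : Int :=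
  pvMerge (PySem.List.sorted left_list (fun x => x) false)
          (PySem.List.sorted right_list (fun x => x) false)

-- ===== PRECONDITION & SPEC =====
def Spec_part_2 (left_list : List Int) (right_list : List Int) (out : Int) : Prop := out = part_2_alt left_list right_list
instance (left_list : List Int) (right_list : List Int) (out : Int) : Decidable (Spec_part_2 left_list right_list out) := by unfold Spec_part_2; infer_instance

-- ===== CLAIM (what is proved, stated in full; the proofs are below) =====
def Claim_equal_part_2 : Prop := ∀ (left_list : List Int) (right_list : List Int), Dom_part_2 left_list right_list → Spec_part_2 left_list right_list (part_2 left_list right_list)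

-- ===== LEMMAS AND PROOFS =====

-- A's inner loop counts occurrences
theorem inner_count (right_list : List Int) (x a : Int) :
    right_list.foldl (fun t r => if r == x then t + 1 else t) a
      = a + (right_list.count x : Int) := by
  induction right_list generalizing a with
  | nil => simp
  | cons y ys ih =>
    rw [List.foldl_cons, ih, List.count_cons]
    by_cases h : y = x <;> simp [h] <;> try ring

-- A equals the similarity sum
theorem part_2_eq_sum (left_list right_list : List Int) :
    part_2 left_list right_list
      = (left_list.map (fun n => n * (right_list.count n : Int))).sum := by
  unfold part_2
  induction left_list using List.reverseRecOn with
  | nil => simp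
  | append_singleton xs x ih =>
    rw [List.foldl_append, ih, List.map_append]
    have h := inner_count right_list x 0
    simp only [beq_iff_eq] at h
    simp [h]

-- pvRunLen is the length of the leading run
theorem runLen_eq_takeWhile (v : Int) (xs : List Int) :
    pvRunLen v xs = (xs.takeWhile (· == v)).length := by
  induction xs with
  | nil => rfl
  | cons x t ih =>
    by_cases h : x = v <;> simp [pvRunLen, h, ih]

-- the leading run is a block of copies of v
theorem takeWhile_eq_replicate (v : Int) (xs : List Int) :
    xs.takeWhile (· == v) = List.replicate (xs.takeWhile (· == v)).length v := by
  induction xs with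
  | nil => rfl
  | cons x t ih =>
    by_cases h : x = v <;> simp [h, List.replicate]
    exact ih

-- on a sorted list whose elements are all ≥ v, the leading run of v's is all of them
theorem runLen_eq_count (v : Int) (xs : List Int) (hs : xs.Pairwise (· ≤ ·))
    (hge : ∀ y ∈ xs, v ≤ y) :
    pvRunLen v xs = xs.count v := by
  induction xs with
  | nil => rfl
  | cons x t ih =>
    rcases List.pairwise_cons.mp hs with ⟨hx, ht⟩
    by_cases h : x = v
    · subst h
      have : ∀ y ∈ t, x ≤ y := hx
      simp [pvRunLen, ih ht this]
    · have hv : v < x := lt_of_le_of_ne (hge x (List.mem_cons_self)) (Ne.symm h)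
      have hcz : t.count v = 0 := by
        rw [List.count_eq_zero]
        intro hm
        exact absurd (hx v hm) (not_le.mpr hv)
      simp [pvRunLen, h, hcz]

-- the similarity sum (proof-side abbreviation)
def pvSim (L R : List Int) : Int := (L.map (fun n => n * (R.count n : Int))).sum

-- the merge computes the similarity sum on sorted inputs
theorem merge_eq_sum (n : Nat) (L R : List Int) (hn : L.length + R.length ≤ n)
    (hL : L.Pairwise (· ≤ ·)) (hR : R.Pairwise (· ≤ ·)) :
    pvMerge L R = pvSim L R := by
  induction n generalizing L R with
  | zero =>
    have : L = [] := by cases L <;> simp_all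
    subst this; simp [pvMerge, pvSim]
  | succ m ih =>
    match L, R with
    | [], R => simp [pvMerge, pvSim]
    | a :: as, [] => simp [pvMerge, pvSim]
    | a :: as, b :: bs =>
      rcases List.pairwise_cons.mp hL with ⟨ha, has⟩
      rcases List.pairwise_cons.mp hR with ⟨hb, hbs⟩
      simp only [List.length_cons] at hn
      by_cases hab : a < b
      · -- a < every element of b::bs, so count a (b::bs) = 0
        have hcz : (b :: bs).count a = 0 := by
          rw [List.count_eq_zero]
          intro hm
          rcases List.mem_cons.mp hm with h | h
          · exact absurd h (ne_of_lt hab)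
          · exact absurd rfl (ne_of_lt (lt_of_lt_of_le hab (hb a h)))
        rw [pvMerge]
        simp only [if_pos hab]
        rw [ih as (b :: bs) (by simp only [List.length_cons] at hn ⊢; omega) has hR]
        simp [pvSim, hcz]
      · by_cases hba : b < a
        · -- b < every element of a::as, so dropping b leaves every count unchanged
          have hmap : pvSim (a :: as) (b :: bs) = pvSim (a :: as) bs := by
            unfold pvSim
            congr 1
            apply List.map_congr_left
            intro x hx
            have hbx : b < x := by
              rcases List.mem_cons.mp hx with h | h
              · exact h ▸ hba
              · exact lt_of_lt_of_le hba (ha x h)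
            simp [ne_of_lt hbx]
          rw [pvMerge]
          simp only [if_neg hab, if_pos hba]
          rw [ih (a :: as) bs (by simp only [List.length_cons] at hn ⊢; omega) hL hbs, hmap]
        · -- a = b: peel the whole left run at once
          have heq : a = b := le_antisymm (not_lt.mp hba) (not_lt.mp hab)
          have hge : ∀ y ∈ b :: bs, a ≤ y := by
            intro y hy
            rcases List.mem_cons.mp hy with h | h
            · exact h ▸ heq.le
            · exact heq ▸ hb y h
          set P := (a :: as).takeWhile (· == a) with hP
          set D := (a :: as).dropWhile (· == a) with hD
          have hsplit : P ++ D = a :: as := List.takeWhile_append_dropWhile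
          -- lengths: P is nonempty (head a matches), so D is shorter than a::as
          have hPlen : 1 ≤ P.length := by
            rw [hP]; simp [List.takeWhile]
          have hlen : P.length + D.length = as.length + 1 := by
            have := congrArg List.length hsplit
            simpa using this
          have hDsorted : D.Pairwise (· ≤ ·) :=
            hL.sublist (hD ▸ List.dropWhile_sublist _)
          have hDsum : pvMerge D (b :: bs) = pvSim D (b :: bs) :=
            ih D (b :: bs) (by simp only [List.length_cons] at hn ⊢; omega) hDsorted hR
          -- the run is replicate
          have hrepl : P = List.replicate P.length a := hP ▸ takeWhile_eq_replicate a _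
          have hPsum : pvSim P (b :: bs) = (P.length : Int) * (a * ((b :: bs).count a : Int)) := by
            rw [pvSim, hrepl]
            simp [List.map_replicate, List.sum_replicate, List.length_replicate]
          have hS : pvSim (a :: as) (b :: bs) = pvSim P (b :: bs) + pvSim D (b :: bs) := by
            rw [← hsplit]; simp [pvSim]
          have hcnt : pvRunLen a (b :: bs) = (b :: bs).count a := runLen_eq_count a _ hR hge
          have hk : pvRunLen a (a :: as) = P.length := by
            rw [runLen_eq_takeWhile, hP]
          rw [pvMerge]
          simp only [if_neg hab, if_neg hba]
          rw [hcnt, hk, ← hD, hDsum, hS, hPsum]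
          ring

-- ===== VERDICT (by name: the statement is the Claim_ definition above) =====
theorem part_2_spec : Claim_equal_part_2 := by
  intro left_list right_list _
  unfold Spec_part_2 part_2_alt
  have hLperm : (PySem.List.sorted left_list (fun x => x) false).Perm left_list :=
    PySem.List.sorted_perm left_list (fun x => x) false
  have hRperm : (PySem.List.sorted right_list (fun x => x) false).Perm right_list :=
    PySem.List.sorted_perm right_list (fun x => x) false
  have hLs : (PySem.List.sorted left_list (fun x => x) false).Pairwise (· ≤ ·) := by
    simpa using PySem.List.sorted_pairwise left_list (fun x => x)
  have hRs : (PySem.List.sorted right_list (fun x => x) false).Pairwise (· ≤ ·) := by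
    simpa using PySem.List.sorted_pairwise right_list (fun x => x)
  rw [merge_eq_sum (left_list.length + right_list.length) _ _
        (by rw [PySem.List.length_sorted, PySem.List.length_sorted]) hLs hRs, part_2_eq_sum]
  have hcnt : (fun n : Int => n * (((PySem.List.sorted right_list (fun x => x) false).count n : Int)))
      = (fun n : Int => n * ((right_list.count n : Int))) := by
    funext n
    rw [hRperm.count_eq]
  unfold pvSim
  rw [hcnt]
  exact ((hLperm.map (fun n : Int => n * ((right_list.count n : Int)))).sum_eq).symm
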